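-- pv_equiv track=rewrite | github.com/tolganaymun/Leetcode-Python-Algorithms | method_30_longest_substring_without_spaces.py | longest_substring_without_spaces
-- ===== SOURCE A (Python) =====
-- def longest_substring_without_spaces(text):
--     current_length = 0
--     max_length = 0
--     for char in text:
--         if char == " ":
--             current_length = 0
--         else:
--             current_length += 1
--             if current_length > max_length:
--                 max_length = current_length
--     return max_length
-- ===== SOURCE B (Python) =====
-- def longest_substring_without_spaces(text):
--     segments = text.split(" ")
--     return max(len(segment) for segment in segments)
-- ===== Notes on version B (the rewrite author's own statement) =====
-- stated objective: idiomatic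
-- what changed: Replaces A's single-pass counter loop with split-on-literal-space into maximal non-space segments followed by a max over segment lengths.
import Mathlib
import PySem

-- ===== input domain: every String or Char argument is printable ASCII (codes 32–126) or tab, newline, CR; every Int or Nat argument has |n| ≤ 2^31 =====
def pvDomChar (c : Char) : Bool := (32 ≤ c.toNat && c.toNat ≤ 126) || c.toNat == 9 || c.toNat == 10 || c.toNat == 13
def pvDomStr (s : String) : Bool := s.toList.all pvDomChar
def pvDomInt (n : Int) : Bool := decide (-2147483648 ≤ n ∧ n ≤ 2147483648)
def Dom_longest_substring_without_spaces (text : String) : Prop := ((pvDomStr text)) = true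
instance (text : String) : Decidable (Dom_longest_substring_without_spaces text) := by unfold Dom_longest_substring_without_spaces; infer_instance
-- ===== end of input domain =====

-- B replaces A's single-counter scan by "split on literal ' ' then take the max segment length" (alternative decomposition, same cost).


-- ===== PORT A =====
-- for char in text: if char == " ": current_length = 0 else: current_length += 1; if current_length > max_length: max_length = current_length
def longest_substring_without_spaces (text : String) : Int :=
  (text.toList.foldl
    (fun (st : Int × Int) char =>
      if char = ' ' then (0, st.2)
      else
        let current_length := st.1 + 1
        if current_length > st.2 then (current_length, current_length)
        else (current_length, st.2))
    (0, 0)).2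

-- ===== PORT B =====
-- segments = text.split(" "); return max(len(segment) for segment in segments)
def longest_substring_without_spaces_alt (text : String) : Int :=
  let segments := PySem.Chars.splitOn text.toList [' ']
  match PySem.List.max? (segments.map (fun segment => PySem.Chars.len segment)) (fun y => y) with
  | some m => m
  | none => 0   -- unreachable: str.split(" ") always yields at least one piece

-- ===== PRECONDITION & SPEC =====
def Spec_longest_substring_without_spaces (text : String) (out : Int) : Prop := out = longest_substring_without_spaces_alt text
instance (text : String) (out : Int) : Decidable (Spec_longest_substring_without_spaces text out) := by unfold Spec_longest_substring_without_spaces; infer_instance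

-- ===== CLAIM (what is proved, stated in full; the proofs are below) =====
def Claim_equal_longest_substring_without_spaces : Prop := ∀ (text : String), Dom_longest_substring_without_spaces text → Spec_longest_substring_without_spaces text (longest_substring_without_spaces text)

-- ===== LEMMAS AND PROOFS =====

-- simple reference splitter: segments of `l` separated by single spaces, `pre` prefixed to the first segment
def pvSplitSimple (pre : List Char) : List Char → List (List Char)
  | [] => [pre]
  | c :: rest => if c = ' ' then pre :: pvSplitSimple [] rest else pvSplitSimple (pre ++ [c]) rest

-- max segment length of `l`, the first segment already holding `cur` characters
def pvMaxSeg : List Char → Int → Int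
  | [], cur => cur
  | c :: rest, cur => if c = ' ' then max cur (pvMaxSeg rest 0) else pvMaxSeg rest (cur + 1)

theorem pvGo_spec (l : List Char) : ∀ (fuel : Nat) (cur : List Char) (acc : List (List Char)), l.length ≤ fuel →
    PySem.Chars.splitOn.go [' '] fuel l cur acc = acc.reverse ++ pvSplitSimple cur.reverse l := by
  induction l with
  | nil =>
      intro fuel cur acc _
      cases fuel with
      | zero => rw [PySem.Chars.splitOn.go.eq_def]; simp [pvSplitSimple]
      | succ f => rw [PySem.Chars.splitOn.go.eq_def]; simp [pvSplitSimple]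
  | cons c rest ih =>
      intro fuel cur acc hlen
      cases fuel with
      | zero => simp at hlen
      | succ f =>
          rw [PySem.Chars.splitOn.go.eq_def]
          by_cases hc : c = ' '
          · subst hc
            simp only [List.isPrefixOf, beq_self_eq_true, Bool.true_and,
              if_pos, List.length_cons, List.length_nil, List.drop_succ_cons, List.drop_zero]
            rw [ih f [] (cur.reverse :: acc) (by simpa using Nat.lt_succ_iff.mp (by simpa using hlen))]
            simp [pvSplitSimple]
          · simp only [List.isPrefixOf, Bool.and_true]
            rw [if_neg (by simp; intro h; exact hc h.symm)]
            rw [ih f (c :: cur) acc (by simpa using Nat.lt_succ_iff.mp (by simpa using hlen))]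
            simp [pvSplitSimple, hc]

theorem pvSplitOn_eq (l : List Char) : PySem.Chars.splitOn l [' '] = pvSplitSimple [] l := by
  rw [PySem.Chars.splitOn, pvGo_spec l (l.length + 1) [] [] (by omega)]
  simp

theorem pvSplitSimple_ne_nil (l : List Char) (pre : List Char) : pvSplitSimple pre l ≠ [] := by
  induction l generalizing pre with
  | nil => simp [pvSplitSimple]
  | cons c rest ih =>
      by_cases hc : c = ' '
      · simp [pvSplitSimple, hc]
      · simp [pvSplitSimple, hc]; exact ih _

theorem pvLe_maxSeg (l : List Char) : ∀ (cur : Int), cur ≤ pvMaxSeg l cur := by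
  induction l with
  | nil => intro cur; simp [pvMaxSeg]
  | cons c rest ih =>
      intro cur
      by_cases hc : c = ' '
      · simp [pvMaxSeg, hc]
      · simp only [pvMaxSeg, if_neg hc]
        have := ih (cur + 1); omega

theorem pvFoldlMax_comm (t : List Int) : ∀ (a b : Int), t.foldl max (max a b) = max a (t.foldl max b) := by
  induction t with
  | nil => intro a b; simp
  | cons c t ih =>
      intro a b
      simp only [List.foldl_cons]
      rw [max_assoc, ih]

-- A's loop equals `max mx (pvMaxSeg l cur)` when the current run has length cur ≤ mx
theorem pvLoopA_spec (l : List Char) : ∀ (cur mx : Int), 0 ≤ cur → cur ≤ mx →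
    (l.foldl
      (fun (st : Int × Int) char =>
        if char = ' ' then (0, st.2)
        else
          let current_length := st.1 + 1
          if current_length > st.2 then (current_length, current_length)
          else (current_length, st.2))
      (cur, mx)).2 = max mx (pvMaxSeg l cur) := by
  induction l with
  | nil => intro cur mx h0 hcm; simp [pvMaxSeg]; omega
  | cons c rest ih =>
      intro cur mx h0 hcm
      simp only [List.foldl_cons]
      by_cases hc : c = ' '
      · rw [if_pos hc]
        rw [ih 0 mx le_rfl (by omega)]
        simp [pvMaxSeg, hc]
        omega
      · rw [if_neg hc]
        have hstep : (if cur + 1 > mx then ((cur + 1 : Int), (cur + 1 : Int)) else (cur + 1, mx))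
            = (cur + 1, max mx (cur + 1)) := by
          split_ifs with h <;> simp <;> omega
        rw [hstep, ih (cur + 1) (max mx (cur + 1)) (by omega) (by omega)]
        simp only [pvMaxSeg, if_neg hc]
        have := pvLe_maxSeg rest (cur + 1)
        omega

-- max of segment lengths of pvSplitSimple, computed B-style, equals pvMaxSeg
theorem pvMaxLens_spec (l : List Char) : ∀ (pre : List Char),
    (((pvSplitSimple pre l).map (fun s => (s.length : Int))).tail).foldl max
      (((pvSplitSimple pre l).map (fun s => (s.length : Int))).headI) = pvMaxSeg l (pre.length : Int) := by
  induction l with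
  | nil => intro pre; simp [pvSplitSimple, pvMaxSeg]
  | cons c rest ih =>
      intro pre
      by_cases hc : c = ' '
      · simp only [pvSplitSimple, if_pos hc, pvMaxSeg, List.map_cons]
        obtain ⟨h, t, hht⟩ : ∃ h t, pvSplitSimple ([] : List Char) rest = h :: t := by
          cases hs : pvSplitSimple ([] : List Char) rest with
          | nil => exact absurd hs (pvSplitSimple_ne_nil rest [])
          | cons h t => exact ⟨h, t, rfl⟩
        have ihr := ih ([] : List Char)
        rw [hht] at ihr ⊢
        simp only [List.map_cons, List.tail_cons, List.headI, List.foldl_cons] at ihr ⊢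
        rw [pvFoldlMax_comm]
        rw [ihr]
        norm_num
      · simp only [pvSplitSimple, pvMaxSeg, if_neg hc]
        rw [ih (pre ++ [c])]
        have : ((pre ++ [c]).length : Int) = (pre.length : Int) + 1 := by simp
        rw [this]

-- ===== VERDICT (by name: the statement is the Claim_ definition above) =====
theorem longest_substring_without_spaces_spec : Claim_equal_longest_substring_without_spaces := by
  intro text _
  unfold Spec_longest_substring_without_spaces longest_substring_without_spaces longest_substring_without_spaces_alt
  rw [pvSplitOn_eq]
  obtain ⟨h, t, hht⟩ : ∃ h t, pvSplitSimple ([] : List Char) text.toList = h :: t := by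
    cases hs : pvSplitSimple ([] : List Char) text.toList with
    | nil => exact absurd hs (pvSplitSimple_ne_nil text.toList [])
    | cons h t => exact ⟨h, t, rfl⟩
  have hmax := pvMaxLens_spec text.toList ([] : List Char)
  rw [hht] at hmax ⊢
  simp only [PySem.Chars.len, List.map_cons]
  rw [PySem.List.max?_id_cons]
  simp only [List.map_cons, List.tail_cons, List.headI] at hmax
  rw [pvLoopA_spec text.toList 0 0 le_rfl le_rfl]
  rw [hmax]
  have := pvLe_maxSeg text.toList (0 : Int)
  simp at this ⊢
  omega
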